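-- pv_equiv track=rewrite | github.com/Durgaprasad-kakarla/Geeks-for-Geeks | Difficulty: Medium/Maximize median after doing k addition operation/maximize-median-after-doing-k-addition-operation.py | maximizeMedian
-- ===== SOURCE A (Python) =====
-- def maximizeMedian(arr, k):
--     # code here
--     arr.sort()
--     def increment_elements(arr,ele):
--         n=len(arr)
--         median_ind=(n//2) if n%2 else n//2-1
--         tot=0
--         for i in range(median_ind,n):
--             if ele>arr[i]:
--                 tot+=(ele-arr[i])
--                 arr[i]=ele
--         median=(arr[median_ind]+arr[median_ind+1])//2 if n%2==0 else arr[median_ind]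
--         return tot,median
--     l,r=arr[0],arr[-1]+k
--     ans=-1
--     while l<=r:
--         mid=(l+r)//2
--         tot,median=increment_elements(arr.copy(),mid)
--         if tot<=k:
--             ans=median
--             l=mid+1
--         else:
--             r=mid-1
--     return ans
-- ===== SOURCE B (Python) =====
-- def maximizeMedian(arr, k):
--     # Binary search on the target median level; each feasibility check is
--     # O(log n) via prefix sums + hand-rolled bisect (A's check is O(n) with a copy).
--     a = sorted(arr)
--     n = len(a)
--     mi = n // 2 if n % 2 else n // 2 - 1
--     s = 0
--     pre = [0]
--     for v in a:
--         s += v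
--         pre.append(s)
--
--     def bisect_left(x):
--         lo, hi = 0, n
--         while lo < hi:
--             m = (lo + hi) // 2
--             if a[m] < x:
--                 lo = m + 1
--             else:
--                 hi = m
--         return lo
--
--     def cost_median(m):
--         j = max(bisect_left(m), mi)
--         tot = m * (j - mi) - (pre[j] - pre[mi])
--         lo_v = a[mi] if m <= a[mi] else m
--         if n % 2 == 0:
--             hi_v = a[mi + 1] if m <= a[mi + 1] else m
--             med = (lo_v + hi_v) // 2
--         else:
--             med = lo_v
--         return tot, med
--
--     l, r = a[0], a[-1] + k
--     ans = -1
--     while l <= r: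
--         mid = (l + r) // 2
--         tot, med = cost_median(mid)
--         if tot <= k:
--             ans = med
--             l = mid + 1
--         else:
--             r = mid - 1
--     return ans
-- ===== Notes on version B (the rewrite author's own statement) =====
-- stated objective: faster
-- what changed: B keeps the binary search on the median level but replaces A's O(n) feasibility check (copying the list and clamping a suffix element by element) with an O(log n) check via a prefix-sum array and a hand-rolled bisect, and computes the resulting median by a closed formula instead of reading the mutated copy; note A sorts its argument in place while B does not (return values are what is proved equal).
import Mathlib
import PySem

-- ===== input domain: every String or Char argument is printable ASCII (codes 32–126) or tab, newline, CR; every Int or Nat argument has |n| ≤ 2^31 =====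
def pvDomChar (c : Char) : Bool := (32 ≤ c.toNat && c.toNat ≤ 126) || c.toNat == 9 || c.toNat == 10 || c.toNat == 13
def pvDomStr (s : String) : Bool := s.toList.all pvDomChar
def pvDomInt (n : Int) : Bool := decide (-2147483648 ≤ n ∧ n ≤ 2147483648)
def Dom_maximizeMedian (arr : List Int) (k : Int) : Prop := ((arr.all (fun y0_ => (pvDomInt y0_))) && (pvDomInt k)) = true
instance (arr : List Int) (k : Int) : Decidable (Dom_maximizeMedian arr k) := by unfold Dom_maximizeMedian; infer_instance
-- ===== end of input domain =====

-- B replaces A's O(n) per-candidate feasibility check (copy + clamp a suffix) by an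
-- O(log n) check with prefix sums and a bisect; A sorts its argument in place, B does
-- not (the theorems are about the return value only).

-- ===== PORT A =====
-- body of increment_elements' for-loop: state is (tot, arr)
def pvIncrStep (ele : Int) (st : Int × List Int) (i : Int) : Int × List Int :=
  if ele > PySem.List.pyGetD st.2 i 0 then
    (st.1 + (ele - PySem.List.pyGetD st.2 i 0), PySem.List.pySetD st.2 i ele)
  else st

-- increment_elements(arr, ele) -> (tot, median)
def pvIncrementElements (arr : List Int) (ele : Int) : Int × Int :=
  let n := PySem.List.len arr
  let mi := if PySem.Int.mod n 2 ≠ 0 then PySem.Int.floordiv n 2 else PySem.Int.floordiv n 2 - 1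
  let res := (PySem.List.pyRange mi n 1).foldl (pvIncrStep ele) (0, arr)
  let median := if PySem.Int.mod n 2 = 0 then
      PySem.Int.floordiv (PySem.List.pyGetD res.2 mi 0 + PySem.List.pyGetD res.2 (mi + 1) 0) 2
    else PySem.List.pyGetD res.2 mi 0
  (res.1, median)

-- A's while-loop (arr.copy() is value copy here)
def pvALoop (a : List Int) (k : Int) (l r ans : Int) : Int :=
  if h : l ≤ r then
    let mid := PySem.Int.floordiv (l + r) 2
    let tm := pvIncrementElements a mid
    if tm.1 ≤ k then pvALoop a k (mid + 1) r tm.2 else pvALoop a k l (mid - 1) ans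
  else ans
termination_by (r + 1 - l).toNat
decreasing_by
  · have := PySem.Int.floordiv_two_mid_bounds h; omega
  · have := PySem.Int.floordiv_two_mid_bounds h; omega

def maximizeMedian (arr : List Int) (k : Int) : Int :=
  let a := PySem.List.sorted arr (fun x => x) false
  -- arr[0] / arr[-1]: valid under Pre_ (arr ≠ []), hence pyGetD
  pvALoop a k (PySem.List.pyGetD a 0 0) (PySem.List.pyGetD a (-1) 0 + k) (-1)

-- ===== PORT B =====
-- Source B's prefix-sum loop: s = 0; pre = [0]; for v in a: s += v; pre.append(s)
def pvPrefix (a : List Int) : List Int :=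
  (a.foldl (fun st v => (st.1 + v, st.2 ++ [st.1 + v])) (0, [0])).2

-- Source B's hand-written bisect_left loop (lo, hi are nonnegative Python ints → Nat;
-- (lo+hi)//2 on nonnegative ints is Nat division, exact)
def pvBisectLoop (a : List Int) (x : Int) (lo hi : Nat) : Nat :=
  if lo < hi then
    let m := (lo + hi) / 2
    if a.getD m 0 < x then pvBisectLoop a x (m + 1) hi else pvBisectLoop a x lo m
  else lo
termination_by hi - lo
decreasing_by all_goals omega

-- cost_median(m): closure variables a, n, mi, pre passed explicitly
def pvCostMedian (a : List Int) (pre : List Int) (n mi : Int) (m : Int) : Int × Int :=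
  let j := max ((pvBisectLoop a m 0 a.length : Int)) mi
  let tot := m * (j - mi) - (PySem.List.pyGetD pre j 0 - PySem.List.pyGetD pre mi 0)
  let loV := if m ≤ PySem.List.pyGetD a mi 0 then PySem.List.pyGetD a mi 0 else m
  let med := if PySem.Int.mod n 2 = 0 then
      let hiV := if m ≤ PySem.List.pyGetD a (mi + 1) 0 then PySem.List.pyGetD a (mi + 1) 0 else m
      PySem.Int.floordiv (loV + hiV) 2
    else loV
  (tot, med)

def pvBLoop (a pre : List Int) (n mi k : Int) (l r ans : Int) : Int :=
  if h : l ≤ r then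
    let mid := PySem.Int.floordiv (l + r) 2
    let tm := pvCostMedian a pre n mi mid
    if tm.1 ≤ k then pvBLoop a pre n mi k (mid + 1) r tm.2 else pvBLoop a pre n mi k l (mid - 1) ans
  else ans
termination_by (r + 1 - l).toNat
decreasing_by
  · have := PySem.Int.floordiv_two_mid_bounds h; omega
  · have := PySem.Int.floordiv_two_mid_bounds h; omega

def maximizeMedian_alt (arr : List Int) (k : Int) : Int :=
  let a := PySem.List.sorted arr (fun x => x) false
  let n := PySem.List.len a
  let mi := if PySem.Int.mod n 2 ≠ 0 then PySem.Int.floordiv n 2 else PySem.Int.floordiv n 2 - 1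
  let pre := pvPrefix a
  pvBLoop a pre n mi k (PySem.List.pyGetD a 0 0) (PySem.List.pyGetD a (-1) 0 + k) (-1)

-- ===== PRECONDITION & SPEC =====
-- A evaluates arr[0] (IndexError on []): Pre_ excludes only the empty list.
def Pre_maximizeMedian (arr : List Int) (k : Int) : Prop := arr ≠ []
instance (arr : List Int) (k : Int) : Decidable (Pre_maximizeMedian arr k) := by
  unfold Pre_maximizeMedian; infer_instance

def pvWitness_maximizeMedian : List Int × Int := ([3, 1, 2, 5], 4)

def Spec_maximizeMedian (arr : List Int) (k : Int) (out : Int) : Prop := out = maximizeMedian_alt arr k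
instance (arr : List Int) (k : Int) (out : Int) : Decidable (Spec_maximizeMedian arr k out) := by
  unfold Spec_maximizeMedian; infer_instance

-- ===== CLAIM (what is proved, stated in full; the proofs are below) =====
def Claim_equal_maximizeMedian : Prop := ∀ (arr : List Int) (k : Int), Dom_maximizeMedian arr k → Pre_maximizeMedian arr k → Spec_maximizeMedian arr k (maximizeMedian arr k)

-- ===== LEMMAS AND PROOFS =====

theorem sum_map_msub (m : Int) (l : List Int) :
    (l.map (fun x => m - x)).sum = m * l.length - l.sum := by
  induction l with
  | nil => simp
  | cons v t ih => simp [ih]; ring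

theorem foldA (a : List Int) (m : Int) :
    ∀ (c t : Nat) (b : List Int) (tot : Int),
      t + c = a.length → b.length = a.length →
      (∀ i, t ≤ i → b.getD i 0 = a.getD i 0) →
      ((PySem.List.pyRange (t : Int) (a.length : Int) 1).foldl (pvIncrStep m) (tot, b)).1
        = tot + (((a.drop t).map (fun x => max 0 (m - x))).sum) ∧
      ((PySem.List.pyRange (t : Int) (a.length : Int) 1).foldl (pvIncrStep m) (tot, b)).2.length = a.length ∧
      (∀ i, ((PySem.List.pyRange (t : Int) (a.length : Int) 1).foldl (pvIncrStep m) (tot, b)).2.getD i 0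
          = if t ≤ i ∧ i < a.length then max m (a.getD i 0) else b.getD i 0) := by
  intro c
  induction c with
  | zero =>
    intro t b tot ht hb hag
    have h1 : (a.length : Int) ≤ (t : Int) := by omega
    rw [PySem.List.pyRange_one_eq_nil (by exact_mod_cast h1)]
    refine ⟨by simp [List.drop_eq_nil_of_le (by omega : a.length ≤ t)], by simpa using hb, ?_⟩
    intro i
    simp only [List.foldl_nil]
    rw [if_neg (by omega)]
  | succ c ih =>
    intro t b tot ht hb hag
    have hlt : (t : Int) < (a.length : Int) := by exact_mod_cast (by omega : t < a.length)
    rw [PySem.List.pyRange_one_cons hlt]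
    simp only [List.foldl_cons]
    have hbt : b.getD t 0 = a.getD t 0 := hag t le_rfl
    have htlen : t < a.length := by omega
    have hdrop : a.drop t = a.getD t 0 :: a.drop (t + 1) := by
      rw [List.getD_eq_getElem a 0 htlen]
      exact List.drop_eq_getElem_cons htlen
    have hcast : ((t : Int) + 1) = ((t + 1 : Nat) : Int) := by push_cast; ring
    by_cases hm : m > b.getD t 0
    · have hstep : pvIncrStep m (tot, b) (t : Int)
          = (tot + (m - b.getD t 0), b.set t m) := by
        simp only [pvIncrStep, PySem.List.pyGetD_natCast, PySem.List.pySetD_natCast]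
        rw [if_pos hm]
      rw [hstep, hcast]
      have hb2 : (b.set t m).length = a.length := by simpa using hb
      have hag2 : ∀ i, t + 1 ≤ i → (b.set t m).getD i 0 = a.getD i 0 := by
        intro i hi
        rw [List.getD_eq_getElem?_getD, List.getElem?_set_ne (by omega), ← List.getD_eq_getElem?_getD]
        exact hag i (by omega)
      obtain ⟨e1, e2, e3⟩ := ih (t + 1) (b.set t m) (tot + (m - b.getD t 0)) (by omega) hb2 hag2
      have hmt : m > a.getD t 0 := by rwa [hbt] at hm
      refine ⟨?_, e2, ?_⟩
      · rw [e1, hdrop, List.map_cons, List.sum_cons, hbt,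
          max_eq_right (by omega : (0:Int) ≤ m - a.getD t 0)]
        ring
      · intro i
        rw [e3 i]
        by_cases hit : i = t
        · subst hit
          rw [if_neg (by omega), if_pos (by omega),
            List.getD_eq_getElem _ 0 (by omega : i < (b.set i m).length),
            List.getElem_set_self (by omega)]
          exact (max_eq_left hmt.le).symm
        · by_cases hcond : t + 1 ≤ i ∧ i < a.length
          · rw [if_pos hcond, if_pos (by omega)]
          · rw [if_neg hcond, if_neg (by omega)]
            rw [List.getD_eq_getElem?_getD, List.getElem?_set_ne (by omega), ← List.getD_eq_getElem?_getD]
    · have hstep : pvIncrStep m (tot, b) (t : Int) = (tot, b) := by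
        simp only [pvIncrStep, PySem.List.pyGetD_natCast]
        rw [if_neg hm]
      rw [hstep, hcast]
      obtain ⟨e1, e2, e3⟩ := ih (t + 1) b tot (by omega) hb (fun i hi => hag i (by omega))
      have hmt : m ≤ a.getD t 0 := by rw [← hbt]; exact not_lt.mp hm
      refine ⟨?_, e2, ?_⟩
      · rw [e1, hdrop, List.map_cons, List.sum_cons,
          max_eq_left (by omega : m - a.getD t 0 ≤ (0:Int))]
        ring
      · intro i
        rw [e3 i]
        by_cases hit : i = t
        · subst hit
          rw [if_neg (by omega), if_pos (by omega), hbt]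
          exact (max_eq_right hmt).symm
        · by_cases hcond : t + 1 ≤ i ∧ i < a.length
          · rw [if_pos hcond, if_pos (by omega)]
          · rw [if_neg hcond, if_neg (by omega)]

theorem prefix_fold (a : List Int) :
    ∀ (s : Int) (p : List Int),
      (a.foldl (fun st v => (st.1 + v, st.2 ++ [st.1 + v])) (s, p)).2
        = p ++ (List.range a.length).map (fun t => s + (a.take (t + 1)).sum) := by
  induction a with
  | nil => intro s p; simp
  | cons v a ih =>
    intro s p
    simp only [List.foldl_cons, ih (s + v) (p ++ [s + v])]
    rw [List.length_cons, List.range_succ_eq_map]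
    simp [List.map_map, Function.comp]
    intro t _
    ring

theorem prefix_getD (a : List Int) (j : Nat) (hj : j ≤ a.length) :
    (pvPrefix a).getD j 0 = (a.take j).sum := by
  unfold pvPrefix
  rw [prefix_fold a 0 [0]]
  cases j with
  | zero => simp
  | succ t =>
    rw [List.getD_eq_getElem?_getD]
    rw [List.getElem?_append_right (by simp)]
    simp only [List.length_cons, List.length_nil]
    rw [List.getElem?_map, List.getElem?_range (by omega)]
    simp

theorem pairwise_getD_mono (a : List Int) (ha : a.Pairwise (· ≤ ·))
    {i j : Nat} (hij : i ≤ j) (hj : j < a.length) : a.getD i 0 ≤ a.getD j 0 := by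
  rw [List.getD_eq_getElem a 0 (by omega), List.getD_eq_getElem a 0 hj]
  rcases Nat.lt_or_ge i j with h | h
  · exact List.pairwise_iff_getElem.mp ha i j (by omega) hj h
  · have : i = j := by omega
    subst this; rfl

theorem bisect_spec (a : List Int) (ha : a.Pairwise (· ≤ ·)) (x : Int) :
    ∀ (c lo hi : Nat), hi - lo = c → lo ≤ hi → hi ≤ a.length →
      (∀ i, i < lo → a.getD i 0 < x) → (∀ i, hi ≤ i → i < a.length → x ≤ a.getD i 0) →
      lo ≤ pvBisectLoop a x lo hi ∧ pvBisectLoop a x lo hi ≤ hi ∧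
      (∀ i, i < pvBisectLoop a x lo hi → a.getD i 0 < x) ∧
      (∀ i, pvBisectLoop a x lo hi ≤ i → i < a.length → x ≤ a.getD i 0) := by
  intro c
  induction c using Nat.strong_induction_on with
  | _ c ih =>
    intro lo hi hc hlohi hhi hlo hge
    rw [pvBisectLoop]
    by_cases h : lo < hi
    · rw [if_pos h]
      simp only []
      set m := (lo + hi) / 2 with hm
      have hmlo : lo ≤ m := by omega
      have hmhi : m < hi := by omega
      by_cases hax : a.getD m 0 < x
      · rw [if_pos hax]
        refine (ih (hi - (m + 1)) (by omega) (m + 1) hi rfl (by omega) hhi ?_ hge).imp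
          (fun h1 => by omega) (fun h2 => h2)
        intro i hi2
        calc a.getD i 0 ≤ a.getD m 0 := pairwise_getD_mono a ha (by omega) (by omega)
          _ < x := hax
      · rw [if_neg hax]
        refine (ih (m - lo) (by omega) lo m rfl (by omega) (by omega) hlo ?_).imp
          (fun h1 => h1) (fun h2 => h2.imp (fun h3 => by omega) (fun h4 => h4))
        intro i him hia
        calc x ≤ a.getD m 0 := not_lt.mp hax
          _ ≤ a.getD i 0 := pairwise_getD_mono a ha him hia
    · rw [if_neg h]
      have : lo = hi := by omega
      exact ⟨le_rfl, by omega, hlo, by rw [this]; exact hge⟩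

theorem cost_eq (a : List Int) (m : Int) (mi j : Nat) (hmij : mi ≤ j) (hj : j ≤ a.length)
    (hlt : ∀ i, mi ≤ i → i < j → a.getD i 0 < m)
    (hge : ∀ i, j ≤ i → i < a.length → m ≤ a.getD i 0) :
    ((a.drop mi).map (fun x => max 0 (m - x))).sum
      = m * ((j : Int) - (mi : Int)) - ((a.take j).sum - (a.take mi).sum) := by
  have hsplit : a.drop mi = (a.take j).drop mi ++ a.drop j := by
    rw [List.drop_take]
    have : (a.drop mi).take (j - mi) ++ (a.drop mi).drop (j - mi) = a.drop mi := List.take_append_drop _ _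
    rw [List.drop_drop] at this
    rw [show mi + (j - mi) = j by omega] at this  -- drop_drop order?
    exact this.symm
  rw [hsplit, List.map_append, List.sum_append]
  have h1 : ((a.take j).drop mi).map (fun x => max 0 (m - x))
      = ((a.take j).drop mi).map (fun x => m - x) := by
    apply List.map_congr_left
    intro x hx
    obtain ⟨t, ht, rfl⟩ := List.mem_iff_getElem.mp hx
    have hlen : ((a.take j).drop mi).length = j - mi := by
      simp [List.length_drop, List.length_take]; omega
    have : ((a.take j).drop mi)[t] = a.getD (mi + t) 0 := by
      rw [List.getElem_drop, List.getElem_take, List.getD_eq_getElem a 0 (by omega)]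
    rw [this]
    have := hlt (mi + t) (by omega) (by omega)
    omega
  have h2 : ((a.drop j).map (fun x => max 0 (m - x))).sum = 0 := by
    apply List.sum_eq_zero
    intro y hy
    obtain ⟨x, hx, rfl⟩ := List.mem_map.mp hy
    obtain ⟨t, ht, rfl⟩ := List.mem_iff_getElem.mp hx
    rw [List.length_drop] at ht
    have : (a.drop j)[t] = a.getD (j + t) 0 := by
      rw [List.getElem_drop, List.getD_eq_getElem a 0 (by omega)]
    rw [this]
    have := hge (j + t) (by omega) (by omega)
    omega
  rw [h1, h2, sum_map_msub]
  have hlen : ((a.take j).drop mi).length = j - mi := by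
    simp [List.length_drop, List.length_take]; omega
  have hsum : ((a.take j).drop mi).sum = (a.take j).sum - (a.take mi).sum := by
    have : (a.take j).take mi ++ (a.take j).drop mi = a.take j := List.take_append_drop _ _
    rw [List.take_take, min_eq_left hmij] at this
    have h4 := congrArg List.sum this
    rw [List.sum_append] at h4
    omega
  rw [hlen, hsum]
  push_cast [Nat.cast_sub hmij]
  ring

def pvMiN (n : Nat) : Nat := if n % 2 = 0 then n / 2 - 1 else n / 2

theorem mi_bridge (n : Nat) (hn : 0 < n) :
    (if PySem.Int.mod (n : Int) 2 ≠ 0 then PySem.Int.floordiv (n : Int) 2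
     else PySem.Int.floordiv (n : Int) 2 - 1) = ((pvMiN n : Nat) : Int) := by
  have h1 : PySem.Int.mod (n : Int) 2 = (n : Int) % 2 := PySem.Int.mod_eq_emod_of_pos (by norm_num)
  have h2 : PySem.Int.floordiv (n : Int) 2 = (n : Int) / 2 := PySem.Int.floordiv_eq_ediv_of_pos (by norm_num)
  rw [h1, h2]
  unfold pvMiN
  by_cases h : n % 2 = 0
  · have hz : ¬ ((n : Int) % 2 ≠ 0) := by simp; omega
    rw [if_neg hz, if_pos h]
    omega
  · have hz : (n : Int) % 2 ≠ 0 := by omega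
    rw [if_pos hz, if_neg h]
    push_cast
    omega

theorem mod_bridge (n : Nat) : (PySem.Int.mod (n : Int) 2 = 0) ↔ (n % 2 = 0) := by
  rw [PySem.Int.mod_eq_emod_of_pos (by norm_num)]
  constructor <;> intro h <;> omega

theorem miN_lt (n : Nat) (h : 0 < n) : pvMiN n < n := by unfold pvMiN; split <;> omega

theorem step_eq (a : List Int) (ha : a.Pairwise (· ≤ ·)) (hne : a ≠ []) (m : Int) :
    pvCostMedian a (pvPrefix a) (PySem.List.len a)
      (if PySem.Int.mod (PySem.List.len a) 2 ≠ 0 then PySem.Int.floordiv (PySem.List.len a) 2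
       else PySem.Int.floordiv (PySem.List.len a) 2 - 1) m
      = pvIncrementElements a m := by
  have hn : 0 < a.length := List.length_pos_iff.mpr hne
  simp only [pvCostMedian, pvIncrementElements, PySem.List.len_eq, mi_bridge a.length hn]
  set miN := pvMiN a.length with hmiN
  have hmilt : miN < a.length := miN_lt a.length hn
  -- A's fold characterisation
  obtain ⟨e1, e2, e3⟩ := foldA a m (a.length - miN) miN a 0 (by omega) rfl (fun i _ => rfl)
  -- bisect characterisation
  obtain ⟨b1, b2, b3, b4⟩ := bisect_spec a ha m (a.length - 0) 0 a.length rfl (by omega) le_rfl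
    (by omega) (fun i h1 h2 => absurd h1 (by omega))
  set b0 := pvBisectLoop a m 0 a.length with hb0
  set jN := max b0 miN with hjN
  have hjle : jN ≤ a.length := by omega
  have hjcast : max ((b0 : Nat) : Int) ((miN : Nat) : Int) = ((jN : Nat) : Int) := by
    rw [hjN]; exact_mod_cast rfl
  rw [hjcast]
  simp only [PySem.List.pyGetD_natCast]
  have htot : m * ((jN : Int) - (miN : Int)) - ((pvPrefix a).getD jN 0 - (pvPrefix a).getD miN 0)
      = ((List.foldl (pvIncrStep m) (0, a) (PySem.List.pyRange (miN : Int) (a.length : Int) 1)).1) := by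
    rw [e1, prefix_getD a jN hjle, prefix_getD a miN (by omega)]
    rw [cost_eq a m miN jN (by omega) hjle ?hlt ?hge]
    · ring
    case hlt =>
      intro i h1 h2
      exact b3 i (by omega)
    case hge =>
      intro i h1 h2
      exact b4 i (by omega) h2
  rw [htot]
  refine congrArg _ ?_
  have hm0 : (List.foldl (pvIncrStep m) (0, a) (PySem.List.pyRange (miN : Int) (a.length : Int) 1)).2.getD miN 0
      = max m (a.getD miN 0) := by rw [e3 miN, if_pos ⟨le_rfl, hmilt⟩]
  have hcast1 : ((miN : Int) + 1) = ((miN + 1 : Nat) : Int) := by push_cast; ring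
  rw [hcast1, PySem.List.pyGetD_natCast, PySem.List.pyGetD_natCast]
  by_cases hev : PySem.Int.mod ((a.length : Nat) : Int) 2 = 0
  · have h2 : a.length % 2 = 0 := (mod_bridge a.length).mp hev
    have hmi1 : miN + 1 < a.length := by
      rw [hmiN]; simp only [pvMiN, if_pos h2]; omega
    have hm1 : (List.foldl (pvIncrStep m) (0, a) (PySem.List.pyRange (miN : Int) (a.length : Int) 1)).2.getD (miN + 1) 0
        = max m (a.getD (miN + 1) 0) := by rw [e3 (miN + 1), if_pos ⟨by omega, hmi1⟩]
    rw [if_pos hev, if_pos hev, hm0, hm1, ← max_def, ← max_def]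
  · rw [if_neg hev, if_neg hev, hm0, ← max_def]

theorem loop_eq (a pre : List Int) (n mi k : Int)
    (hstep : ∀ m, pvCostMedian a pre n mi m = pvIncrementElements a m) :
    ∀ (l r ans : Int), pvALoop a k l r ans = pvBLoop a pre n mi k l r ans := by
  intro l r ans
  fun_induction pvALoop a k l r ans with
  | case1 l r ans h mid tm hle ih =>
    rw [pvBLoop, dif_pos h]
    simp only [hstep]
    rw [if_pos hle]
    exact ih
  | case2 l r ans h mid tm hle ih =>
    rw [pvBLoop, dif_pos h]
    simp only [hstep]
    rw [if_neg hle]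
    exact ih
  | case3 l r ans h =>
    rw [pvBLoop, dif_neg h]

-- ===== VERDICT (by name: the statement is the Claim_ definition above) =====
theorem maximizeMedian_spec : Claim_equal_maximizeMedian := by
  intro arr k _ hne
  unfold Spec_maximizeMedian maximizeMedian maximizeMedian_alt
  have hne' : PySem.List.sorted arr (fun x => x) false ≠ [] := by
    rw [Ne, PySem.List.sorted_eq_nil_iff]; exact hne
  exact loop_eq _ _ _ _ k
    (fun m => step_eq _ (PySem.List.sorted_pairwise arr (fun x => x)) hne' m) _ _ _
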